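-- pv_equiv track=rewrite | github.com/Temp-Repo-s/task_specific_finetuning | code/source_from_ARCH.py | change_parentheses
-- ===== SOURCE A (Python) =====
-- def string_index(c, s):
--     return [pos for pos, char in enumerate(s) if char == c]
--
-- def change_char_in_string(s, i, c):
--     list_s = list(s)
--     list_s[i] = c
--     return ''.join(list_s)
--
-- def change_parentheses(s):
--     # change (xxx) to [xxx], so that (x) can be detected as the subfigure splitter
--     res = s
--     left = string_index('(', res)[::-1]
--
--     for i in left:
--         first_right_loc = res[i + 1:].find(')')
--         if first_right_loc > 1:
--             res = change_char_in_string(res, i, '[')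
--             res = change_char_in_string(res, i + first_right_loc + 1, ']')
--             left = string_index('(', res)[::-1]
--
--     return res
-- ===== SOURCE B (Python) =====
-- def change_parentheses(s):
--     # single right-to-left pass: match each '(' to the nearest unconsumed ')' via a stack
--     chars = list(s)
--     stack = []  # indices of unconsumed ')' to the right; last element = nearest
--     for i in range(len(chars) - 1, -1, -1):
--         c = chars[i]
--         if c == ')':
--             stack.append(i)
--         elif c == '(' and stack and stack[-1] - i > 2:
--             j = stack.pop()
--             chars[i] = '['
--             chars[j] = ']'
--     return ''.join(chars)
-- ===== Notes on version B (the rewrite author's own statement) =====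
-- stated objective: alternative
-- what changed: Replaced the per-'(' rightward .find(')') scans and full-string rebuilds with a single right-to-left pass over a char array maintaining a stack of unconsumed ')' indices.
import Mathlib
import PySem

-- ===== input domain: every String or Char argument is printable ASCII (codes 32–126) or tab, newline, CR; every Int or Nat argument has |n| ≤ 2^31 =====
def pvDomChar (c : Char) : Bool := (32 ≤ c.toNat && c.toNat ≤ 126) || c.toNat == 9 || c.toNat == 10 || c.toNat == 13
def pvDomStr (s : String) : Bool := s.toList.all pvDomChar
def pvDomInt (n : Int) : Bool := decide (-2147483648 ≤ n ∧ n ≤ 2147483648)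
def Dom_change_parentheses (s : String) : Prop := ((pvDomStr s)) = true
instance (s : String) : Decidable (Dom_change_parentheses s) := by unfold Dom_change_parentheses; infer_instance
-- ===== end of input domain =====

-- B replaces A's per-'(' rightward '.find' scans and string rebuilds by one
-- right-to-left pass with a stack of unconsumed ')' indices (alternative algorithm).

-- ===== PORT A =====
-- [pos for pos, char in enumerate(s) if char == c]
def pvStringIndex (c : Char) (s : List Char) : List Int :=
  ((PySem.List.enumerate s).filter (fun p => p.2 == c)).map (·.1)

-- change_char_in_string: list(s); list_s[i] = c; join. Exact for 0 ≤ i < len(s),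
-- the only indices A ever passes (Python would raise IndexError otherwise).
def pvSetChar (s : List Char) (i : Int) (c : Char) : List Char := s.set i.toNat c

-- str.find(sub) for a single-character sub: index of first occurrence, -1 if absent (exact).
def pvFindChar (c : Char) (s : List Char) : Int :=
  match s.findIdx? (fun x => x == c) with
  | some j => (j : Int)
  | none => -1

-- loop body: state is (res, left); the rebinding of `left` inside the loop is kept
-- even though Python's `for` keeps iterating over the original list object.
def pvALoopStep (st : List Char × List Int) (i : Int) : List Char × List Int :=
  let res := st.1
  let frl := pvFindChar ')' (PySem.List.slice res (some (i + 1)) none)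
  if frl > 1 then
    let r1 := pvSetChar res i '['
    let r2 := pvSetChar r1 (i + frl + 1) ']'
    (r2, (pvStringIndex '(' r2).reverse)   -- [::-1] is reverse (PySem.List.slice?_none_none_neg_one)
  else (res, st.2)

def change_parentheses (s : String) : String :=
  let res := s.toList
  let left := (pvStringIndex '(' res).reverse
  String.ofList (left.foldl pvALoopStep (res, left)).1

-- ===== PORT B =====
-- body of Source B's loop: chars + stack of indices of unconsumed ')' (head = top = nearest).
-- chars[i]/chars[j] assignments are exact for the in-range indices B produces.
def pvBStep (st : List Char × List Int) (i : Int) : List Char × List Int :=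
  let chars := st.1
  let stack := st.2
  let c := PySem.List.pyGetD chars i ' '
  if c == ')' then (chars, i :: stack)
  else if c == '(' then
    match stack with
    | j :: rest =>
        if j - i > 2 then ((chars.set i.toNat '[').set j.toNat ']', rest)
        else (chars, j :: rest)
    | [] => (chars, [])
  else (chars, stack)

def change_parentheses_alt (s : String) : String :=
  let chars := s.toList
  String.ofList (((PySem.List.pyRange 0 (chars.length : Int) 1).reverse).foldl pvBStep (chars, [])).1

-- ===== PRECONDITION & SPEC =====
def Spec_change_parentheses (s : String) (out : String) : Prop := out = change_parentheses_alt s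
instance (s : String) (out : String) : Decidable (Spec_change_parentheses s out) := by unfold Spec_change_parentheses; infer_instance

-- ===== CLAIM (what is proved, stated in full; the proofs are below) =====
def Claim_equal_change_parentheses : Prop := ∀ (s : String), Dom_change_parentheses s → Spec_change_parentheses s (change_parentheses s)

-- ===== LEMMAS AND PROOFS =====

-- Nat-indexed spec versions of both algorithms
def parenIdxs : List Char → List Nat
  | [] => []
  | c :: r => if c == '(' then 0 :: (parenIdxs r).map (· + 1) else (parenIdxs r).map (· + 1)

def rIdxs : List Char → List Nat
  | [] => []
  | c :: r => if c == ')' then 0 :: (rIdxs r).map (· + 1) else (rIdxs r).map (· + 1)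

def AStep (res : List Char) (i : Nat) : List Char :=
  match (res.drop (i + 1)).findIdx? (fun x => x == ')') with
  | some j => if 1 < j then (res.set i '[').set (i + j + 1) ']' else res
  | none => res

def Alist (l : List Char) : List Char := ((parenIdxs l).reverse).foldl AStep l

def BStep : (List Char × List Nat) → Nat → (List Char × List Nat)
  | (chars, stack), i =>
    if chars.getD i ' ' == ')' then (chars, i :: stack)
    else if chars.getD i ' ' == '(' then
      match stack with
      | j :: rest => if i + 2 < j then ((chars.set i '[').set j ']', rest) else (chars, j :: rest)
      | [] => (chars, [])
    else (chars, stack)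

def Bcore (l : List Char) : List Char × List Nat := ((List.range l.length).reverse).foldl BStep (l, [])


lemma enumFilterParen (l : List Char) (s : Int) :
    ((PySem.List.enumerate l s).filter (fun p => p.2 == '(')).map (·.1)
      = (parenIdxs l).map (fun (k : Nat) => s + (k : Int)) := by
  induction l generalizing s with
  | nil => simp [PySem.List.enumerate_nil, parenIdxs]
  | cons c l ih =>
    rw [PySem.List.enumerate_cons]
    by_cases hc : c = '('
    · simp only [parenIdxs, hc, beq_self_eq_true, if_true, List.filter_cons, List.map_cons,
        beq_self_eq_true, if_true, ih, List.map_map]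
      congr 1
      · simp
      · apply List.map_congr_left
        intro k _
        simp only [Function.comp_apply]
        push_cast
        ring
    · have hb : (c == '(') = false := by simp [hc]
      simp only [parenIdxs, hb, Bool.false_eq_true, if_false, List.filter_cons, hb, ih,
        List.map_map]
      apply List.map_congr_left
      intro k _
      simp only [Function.comp_apply]
      push_cast
      ring

lemma pvALoopStep_fst (res : List Char) (L : List Int) (n : Nat) :
    (pvALoopStep (res, L) (n : Int)).1 = AStep res n := by
  have hslice : PySem.List.slice res (some ((n : Int) + 1)) none = res.drop (n + 1) := by
    rw [show (n : Int) + 1 = ((n + 1 : Nat) : Int) by push_cast; ring]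
    exact PySem.List.slice_from_natCast res (n + 1)
  simp only [pvALoopStep, pvFindChar, pvSetChar, hslice, AStep]
  cases h : (res.drop (n + 1)).findIdx? (fun x => x == ')') with
  | none => simp [h]
  | some j =>
    simp only [h]
    by_cases hj : 1 < j
    · have h1 : ((j : Int) > 1) := by exact_mod_cast hj
      have h2 : ((n : Int) + (j : Int) + 1).toNat = n + j + 1 := by omega
      have h3 : ((n : Int)).toNat = n := by omega
      simp [h1, hj, h2, h3]
    · have h1 : ¬ ((j : Int) > 1) := by exact_mod_cast hj
      simp [h1, hj]

lemma foldA_fst (idxs : List Nat) : ∀ (res : List Char) (L : List Int),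
    ((idxs.map (fun (k : Nat) => (k : Int))).foldl pvALoopStep (res, L)).1 = idxs.foldl AStep res := by
  induction idxs with
  | nil => intro res L; rfl
  | cons k t ih =>
    intro res L
    simp only [List.map_cons, List.foldl_cons]
    rw [← Prod.mk.eta (p := pvALoopStep (res, L) (k : Int)), ih, pvALoopStep_fst]

lemma changeA_eq (s : String) : change_parentheses s = String.ofList (Alist s.toList) := by
  have h1 : pvStringIndex '(' s.toList = (parenIdxs s.toList).map (fun (k : Nat) => (k : Int)) := by
    unfold pvStringIndex
    have := enumFilterParen s.toList 0
    simpa using this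
  simp only [change_parentheses, Alist]
  simp only [h1, ← List.map_reverse, foldA_fst]

lemma pvBStep_eq (chars : List Char) (stack : List Nat) (n : Nat) :
    pvBStep (chars, stack.map (fun (k : Nat) => (k : Int))) (n : Int)
      = ((BStep (chars, stack) n).1, (BStep (chars, stack) n).2.map (fun (k : Nat) => (k : Int))) := by
  simp only [pvBStep, BStep, PySem.List.pyGetD_natCast]
  by_cases h1 : chars[n]?.getD ' ' = ')'
  · simp [h1]
  · by_cases h2 : chars[n]?.getD ' ' = '('
    · cases stack with
      | nil => simp [h1, h2]
      | cons j rest =>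
        by_cases h3 : n + 2 < j
        · have h4 : 2 < (j : Int) - (n : Int) := by omega
          have h5 : ((n : Int)).toNat = n := by omega
          have h6 : ((j : Int)).toNat = j := by omega
          simp [h1, h2, h3, h4, h5, h6]
        · have h4 : ¬ (2 < (j : Int) - (n : Int)) := by omega
          simp [h1, h2, h3, h4]
    · simp [h1, h2]

lemma foldB_eq (idxs : List Nat) : ∀ (chars : List Char) (stack : List Nat),
    (idxs.map (fun (k : Nat) => (k : Int))).foldl pvBStep (chars, stack.map (fun (k : Nat) => (k : Int)))
      = ((idxs.foldl BStep (chars, stack)).1, (idxs.foldl BStep (chars, stack)).2.map (fun (k : Nat) => (k : Int))) := by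
  induction idxs with
  | nil => intro chars stack; rfl
  | cons k t ih =>
    intro chars stack
    simp only [List.map_cons, List.foldl_cons, pvBStep_eq]
    rw [← Prod.mk.eta (p := BStep (chars, stack) k), ih]

lemma changeB_eq (s : String) : change_parentheses_alt s = String.ofList (Bcore s.toList).1 := by
  simp only [change_parentheses_alt, Bcore]
  have h0 : PySem.List.pyRange 0 (s.toList.length : Int) 1
      = (List.range s.toList.length).map (fun (k : Nat) => (k : Int)) := by
    exact PySem.List.pyRange_zero_natCast s.toList.length
  have h1 := foldB_eq (List.range s.toList.length).reverse s.toList []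
  simp only [List.map_nil] at h1
  simp only [h0, ← List.map_reverse, h1]

lemma AStep_shift (c : Char) (r : List Char) (i : Nat) :
    AStep (c :: r) (i + 1) = c :: AStep r i := by
  unfold AStep
  simp only [List.drop_succ_cons]
  cases h : (r.drop (i + 1)).findIdx? (fun x => x == ')') with
  | none => simp [h]
  | some j =>
    by_cases hj : 1 < j
    · simp [h, hj, List.set_cons_succ, show i + 1 + j + 1 = (i + j + 1) + 1 by omega]
    · simp [h, hj]

lemma foldA_shift (idxs : List Nat) : ∀ (c : Char) (r : List Char),
    (idxs.map (· + 1)).foldl AStep (c :: r) = c :: idxs.foldl AStep r := by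
  induction idxs with
  | nil => intro c r; rfl
  | cons k t ih =>
    intro c r
    simp only [List.map_cons, List.foldl_cons, AStep_shift]
    exact ih c (AStep r k)


lemma Alist_cons (c : Char) (l : List Char) :
    Alist (c :: l) = if c == '(' then AStep (c :: Alist l) 0 else c :: Alist l := by
  by_cases hc : c = '('
  · simp only [Alist, parenIdxs, hc, beq_self_eq_true, if_pos trivial, List.reverse_cons,
      ← List.map_reverse, List.foldl_append, List.foldl_cons, List.foldl_nil, foldA_shift]
  · have hb : (c == '(') = false := by simp [hc]
    simp only [Alist, parenIdxs, hb, Bool.false_eq_true, if_false,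
      ← List.map_reverse, foldA_shift]

lemma BStep_shift (c : Char) (chars : List Char) (stack : List Nat) (i : Nat) :
    BStep (c :: chars, stack.map (· + 1)) (i + 1)
      = ((BStep (chars, stack) i).1.cons c, (BStep (chars, stack) i).2.map (· + 1)) := by
  simp only [BStep, List.getD_cons_succ]
  by_cases h1 : chars[i]?.getD ' ' = ')'
  · simp [h1]
  · by_cases h2 : chars[i]?.getD ' ' = '('
    · cases stack with
      | nil => simp [h1, h2]
      | cons j rest =>
        by_cases h3 : i + 2 < j
        · simp [h1, h2, h3, show i + 1 + 2 < j + 1 from by omega, List.set_cons_succ]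
        · simp [h1, h2, h3, show ¬ (i + 1 + 2 < j + 1) from by omega]
    · simp [h1, h2]

lemma foldB_shift (idxs : List Nat) : ∀ (c : Char) (chars : List Char) (stack : List Nat),
    (idxs.map (· + 1)).foldl BStep (c :: chars, stack.map (· + 1))
      = ((idxs.foldl BStep (chars, stack)).1.cons c, (idxs.foldl BStep (chars, stack)).2.map (· + 1)) := by
  induction idxs with
  | nil => intro c chars stack; rfl
  | cons k t ih =>
    intro c chars stack
    simp only [List.map_cons, List.foldl_cons, BStep_shift]
    rw [← Prod.mk.eta (p := BStep (chars, stack) k)]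
    exact ih c _ _

lemma Bcore_cons (c : Char) (l : List Char) :
    Bcore (c :: l) = BStep ((Bcore l).1.cons c, (Bcore l).2.map (· + 1)) 0 := by
  have h2 := foldB_shift (List.range l.length).reverse c l []
  simp only [List.map_nil] at h2
  have hsucc : List.map Nat.succ ((List.range l.length).reverse)
      = ((List.range l.length).reverse).map (· + 1) := rfl
  simp only [Bcore, List.length_cons, List.range_succ_eq_map, List.reverse_cons,
    List.foldl_append, List.foldl_cons, List.foldl_nil, ← List.map_reverse, hsucc, h2]

lemma head?_rIdxs (r : List Char) : (rIdxs r).head? = r.findIdx? (fun x => x == ')') := by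
  induction r with
  | nil => rfl
  | cons c r ih =>
    by_cases hc : c = ')'
    · simp [rIdxs, hc, List.findIdx?_cons]
    · have hb : (c == ')') = false := by simp [hc]
      simp [rIdxs, hb, List.findIdx?_cons, ih]

lemma rIdxs_set_first : ∀ (r : List Char) (j : Nat) (rest : List Nat),
    rIdxs r = j :: rest → rIdxs (r.set j ']') = rest := by
  intro r
  induction r with
  | nil => intro j rest h; simp [rIdxs] at h
  | cons c r ih =>
    intro j rest h
    by_cases hc : c = ')'
    · simp only [rIdxs, hc, beq_self_eq_true, if_pos trivial, List.cons.injEq] at h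
      obtain ⟨hj, hrest⟩ := h
      subst hj
      simp [List.set_cons_zero, rIdxs, ← hrest]
    · have hb : (c == ')') = false := by simp [hc]
      simp only [rIdxs, hb, Bool.false_eq_true, if_false] at h
      cases hr : rIdxs r with
      | nil => rw [hr] at h; simp at h
      | cons j' rest' =>
        rw [hr] at h
        simp only [List.map_cons, List.cons.injEq] at h
        obtain ⟨hj, hrest⟩ := h
        subst hj
        rw [List.set_cons_succ]
        simp only [rIdxs, hb, Bool.false_eq_true, if_false, ih j' rest' hr, hrest]

lemma main_inv (l : List Char) : Bcore l = (Alist l, rIdxs (Alist l)) := by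
  induction l with
  | nil => rfl
  | cons c l ih =>
    rw [Bcore_cons, ih, Alist_cons]
    by_cases h1 : c = ')'
    · have hb : (c == '(') = false := by simp [h1]
      simp [BStep, h1, rIdxs, hb]
    · by_cases h2 : c = '('
      · have hb1 : (c == ')') = false := by simp [h2, h1]
        cases hst : rIdxs (Alist l) with
        | nil =>
          have hf : (Alist l).findIdx? (fun x => x == ')') = none := by
            rw [← head?_rIdxs, hst]; rfl
          simp [BStep, h2, hst, AStep, hf, rIdxs, hb1]
        | cons j rest =>
          have hf : (Alist l).findIdx? (fun x => x == ')') = some j := by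
            rw [← head?_rIdxs, hst]; rfl
          by_cases hj : 1 < j
          · have hcond : 0 + 2 < j + 1 := by omega
            simp only [BStep, h2, hst, List.map_cons, List.getD_cons_zero, beq_self_eq_true,
              if_pos trivial, hb1, Bool.false_eq_true, if_false, hcond, if_pos trivial,
              AStep, List.drop_succ_cons, List.drop_zero, hf, hj]
            simp [rIdxs, rIdxs_set_first (Alist l) j rest hst, List.set_cons_succ]
          · have hcond : ¬ (0 + 2 < j + 1) := by omega
            simp only [BStep, h2, hst, List.map_cons, List.getD_cons_zero, beq_self_eq_true,
              if_pos trivial, hb1, Bool.false_eq_true, if_false, hcond,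
              AStep, List.drop_succ_cons, List.drop_zero, hf, hj]
            simp [rIdxs, hst]
      · have hb1 : (c == ')') = false := by simp [h1]
        have hb2 : (c == '(') = false := by simp [h2]
        simp [BStep, hb1, hb2, rIdxs]

-- ===== VERDICT =====
theorem change_parentheses_spec : Claim_equal_change_parentheses := by
  intro s _
  unfold Spec_change_parentheses
  rw [changeA_eq, changeB_eq, main_inv]
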